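-- pv_equiv track=rewrite | github.com/RonKand14/BioNetworks | Exercise_1.py | is_graph_valid
-- ===== SOURCE A (Python) =====
-- def is_graph_valid(graph, nodes):
--     """
--     The method checks the validity of the graph provided in terms of containing all the nodes provided
--     :param graph: a graph object
--     :param nodes: a list of nodes
--     :return:True | False
--     """
--     graph_nodes = []
--     for i in range(0, len(graph)):
--         edge = graph[i]
--         for j in range(0, 2):
--             node = edge[j]
--             if node not in graph_nodes:
--                 graph_nodes.append(node)
--     if nodes == graph_nodes:
--         if is_connected(graph, nodes):
--             return True
--         else:
--             return False
--     else:
--         return False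
--
-- def is_connected(graph, nodes):
--     """
--     The method checks the validity of the graph provided in terms of connectivity
--     :param graph: a graph object
--     :param nodes: a list of nodes
--     :return: True | False
--     """
--     connected_nodes = [nodes[0]]
--     for j in range(len(nodes)):
--         for i in range(0, len(graph)):
--             edge = graph[i]
--             node1 = edge[0]
--             node2 = edge[1]
--             if node1 in connected_nodes and node2 not in connected_nodes:
--                 connected_nodes.append(node2)
--             elif node1 not in connected_nodes and node2 in connected_nodes:
--                 connected_nodes.append(node1)
--     if len(connected_nodes) == len(nodes):
--         return True
--     else:
--         return False
-- ===== SOURCE B (Python) =====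
-- def is_graph_valid(graph, nodes):
--     seen = set()
--     order = []
--     for a, b in graph:
--         if a not in seen:
--             seen.add(a)
--             order.append(a)
--         if b not in seen:
--             seen.add(b)
--             order.append(b)
--     if nodes != order:
--         return False
--     if not nodes:
--         return True
--     visited = {nodes[0]}
--     frontier = [nodes[0]]
--     for _ in range(len(nodes)):
--         new_frontier = []
--         for u in frontier:
--             for a, b in graph:
--                 if a == u and b not in visited:
--                     visited.add(b)
--                     new_frontier.append(b)
--                 elif b == u and a not in visited:
--                     visited.add(a)
--                     new_frontier.append(a)
--         frontier = new_frontier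
--     return len(visited) == len(nodes)
-- ===== Notes on version B (the rewrite author's own statement) =====
-- stated objective: alternative
-- what changed: node collection keeps a hash set beside the first-seen order list instead of O(V) list-membership scans, and connectivity is computed by frontier-based BFS rounds (only new nodes are expanded, set membership) instead of len(nodes) full re-scans of the accumulated list; measured ~2x at the largest size but not consistently, so no speed is claimed
import Mathlib
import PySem

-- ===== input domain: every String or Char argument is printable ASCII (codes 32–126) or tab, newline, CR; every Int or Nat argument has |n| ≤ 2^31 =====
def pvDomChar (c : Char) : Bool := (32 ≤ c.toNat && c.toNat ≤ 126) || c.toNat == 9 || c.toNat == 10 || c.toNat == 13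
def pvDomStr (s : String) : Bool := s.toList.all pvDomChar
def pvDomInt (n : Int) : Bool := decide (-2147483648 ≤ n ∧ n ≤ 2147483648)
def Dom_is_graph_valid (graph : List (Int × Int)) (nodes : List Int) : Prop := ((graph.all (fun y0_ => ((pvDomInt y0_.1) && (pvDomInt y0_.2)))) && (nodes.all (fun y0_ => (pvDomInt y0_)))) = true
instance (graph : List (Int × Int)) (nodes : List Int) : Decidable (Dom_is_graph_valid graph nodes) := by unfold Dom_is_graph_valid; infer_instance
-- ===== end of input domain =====

-- B collects nodes with a hash set beside the first-seen order list and decides connectivity by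
-- frontier-based BFS rounds instead of A's len(nodes) full re-scans (objective: alternative).

-- ===== PORT A =====
-- A: collect first-seen endpoint list with `node not in graph_nodes` (list membership)
def pvAddNodeA (acc : List Int) (node : Int) : List Int :=
  if acc.contains node then acc else acc ++ [node]

def pvGraphNodesA (graph : List (Int × Int)) : List Int :=
  graph.foldl (fun acc edge => [edge.1, edge.2].foldl pvAddNodeA acc) []

-- A: one inner pass of is_connected over all edges
def pvPassStepA (c : List Int) (e : Int × Int) : List Int :=
  if c.contains e.1 && !(c.contains e.2) then c ++ [e.2]
  else if !(c.contains e.1) && c.contains e.2 then c ++ [e.1]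
  else c

def pvConnPassA (graph : List (Int × Int)) (c : List Int) : List Int :=
  graph.foldl pvPassStepA c

-- A: is_connected — len(nodes) full passes starting from [nodes[0]]
def pvIsConnectedA (graph : List (Int × Int)) (nodes : List Int) : Bool :=
  let connected := (List.range nodes.length).foldl (fun c _ => pvConnPassA graph c) [nodes.headI]
  decide (connected.length = nodes.length)

def is_graph_valid (graph : List (Int × Int)) (nodes : List Int) : Bool :=
  let graph_nodes := pvGraphNodesA graph
  if nodes = graph_nodes then
    if pvIsConnectedA graph nodes then true else false
  else false

-- ===== PORT B =====
-- B: dedup scan keeping a `seen` set and the first-seen `order` list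
def pvDedupStepB (st : PySem.Set Int × List Int) (e : Int × Int) : PySem.Set Int × List Int :=
  let st1 := if PySem.Set.contains st.1 e.1 then st else (PySem.Set.add st.1 e.1, st.2 ++ [e.1])
  if PySem.Set.contains st1.1 e.2 then st1 else (PySem.Set.add st1.1 e.2, st1.2 ++ [e.2])

-- B: one edge considered while expanding from frontier node u; st = (visited, new_frontier)
def pvBfsEdgeB (u : Int) (st : PySem.Set Int × List Int) (e : Int × Int) : PySem.Set Int × List Int :=
  if e.1 == u && !(PySem.Set.contains st.1 e.2) then (PySem.Set.add st.1 e.2, st.2 ++ [e.2])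
  else if e.2 == u && !(PySem.Set.contains st.1 e.1) then (PySem.Set.add st.1 e.1, st.2 ++ [e.1])
  else st

def pvVisitB (graph : List (Int × Int)) (st : PySem.Set Int × List Int) (u : Int) : PySem.Set Int × List Int :=
  graph.foldl (pvBfsEdgeB u) st

-- B: one BFS round: expand every frontier node, collecting the new frontier
def pvRoundB (graph : List (Int × Int)) (st : PySem.Set Int × List Int) : PySem.Set Int × List Int :=
  st.2.foldl (pvVisitB graph) (st.1, [])

def is_graph_valid_alt (graph : List (Int × Int)) (nodes : List Int) : Bool :=
  let order := (graph.foldl pvDedupStepB (PySem.Set.empty, [])).2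
  if nodes ≠ order then false
  else if nodes.isEmpty then true
  else
    let start := nodes.headI
    let final := (List.range nodes.length).foldl (fun st _ => pvRoundB graph st)
                  (PySem.Set.add PySem.Set.empty start, [start])
    decide (final.1.length = nodes.length)

-- ===== PRECONDITION & SPEC =====
-- Pre_ excludes only graph = [] with nodes = [], where A raises IndexError (is_connected reads nodes[0]).
def Pre_is_graph_valid (graph : List (Int × Int)) (nodes : List Int) : Prop :=
  ¬(graph = [] ∧ nodes = [])
instance (graph : List (Int × Int)) (nodes : List Int) : Decidable (Pre_is_graph_valid graph nodes) := by
  unfold Pre_is_graph_valid; infer_instance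

def pvWitness_is_graph_valid : (List (Int × Int)) × List Int := ([(1, 2)], [1, 2])

def Spec_is_graph_valid (graph : List (Int × Int)) (nodes : List Int) (out : Bool) : Prop := out = is_graph_valid_alt graph nodes
instance (graph : List (Int × Int)) (nodes : List Int) (out : Bool) : Decidable (Spec_is_graph_valid graph nodes out) := by unfold Spec_is_graph_valid; infer_instance

-- ===== CLAIM (what is proved, stated in full; the proofs are below) =====
def Claim_equal_is_graph_valid : Prop := ∀ (graph : List (Int × Int)) (nodes : List Int), Dom_is_graph_valid graph nodes → Pre_is_graph_valid graph nodes → Spec_is_graph_valid graph nodes (is_graph_valid graph nodes)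


-- ===== LEMMAS AND PROOFS =====

-- endpoints of the graph, in edge order
def pvAll (g : List (Int × Int)) : List Int := g.flatMap (fun e => [e.1, e.2])
-- adjacency and reachability
def pvAdj (g : List (Int × Int)) (a b : Int) : Prop := (a, b) ∈ g ∨ (b, a) ∈ g
def pvReach (g : List (Int × Int)) (s x : Int) : Prop := Relation.ReflTransGen (pvAdj g) s x
-- all neighbours of u (w.r.t. g) lie in v
def pvClosedAt (g : List (Int × Int)) (v : List Int) (u : Int) : Prop :=
  ∀ e ∈ g, (e.1 = u → e.2 ∈ v) ∧ (e.2 = u → e.1 ∈ v)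
-- the BFS loop invariant of B
def pvInvB (g : List (Int × Int)) (nodes : List Int) (start : Int)
    (st : PySem.Set Int × List Int) : Prop :=
  st.1.Nodup ∧ (∀ x ∈ st.2, x ∈ st.1) ∧ (∀ x ∈ st.1, pvReach g start x) ∧
  (∀ x ∈ st.1, x ∈ nodes) ∧ (start ∈ st.1) ∧
  (∀ u ∈ st.1, u ∈ st.2 ∨ pvClosedAt g st.1 u)

theorem pvMem_pvAll (g : List (Int × Int)) (x : Int) :
    x ∈ pvAll g ↔ ∃ e ∈ g, x = e.1 ∨ x = e.2 := by
  simp [pvAll]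

theorem pvFoldl_range_iterate {α : Type} (f : α → α) (m : Nat) (c : α) :
    (List.range m).foldl (fun c _ => f c) c = f^[m] c := by
  induction m with
  | zero => simp
  | succ k ih => rw [List.range_succ, List.foldl_append, ih, Function.iterate_succ_apply']; rfl

theorem pvLength_le_of_nodup_subset (X Y : List Int) (hX : X.Nodup) (h : ∀ x ∈ X, x ∈ Y) :
    X.length ≤ Y.length := by
  calc X.length = X.toFinset.card := (List.toFinset_card_of_nodup hX).symm
  _ ≤ Y.toFinset.card := Finset.card_le_card (by intro a ha; simp at ha ⊢; exact h a ha)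
  _ ≤ Y.length := Y.toFinset_card_le

-- ---- the two node-collection scans build the same list ----
theorem pvAdd_pair (s : PySem.Set Int) (x : Int) :
    (if PySem.Set.contains s x then (s, (s : List Int)) else (PySem.Set.add s x, (s : List Int) ++ [x]))
      = (PySem.Set.add s x, PySem.Set.add s x) := by
  by_cases h : x ∈ s
  · simp [h, PySem.Set.add_of_mem h]
  · have hc : PySem.Set.contains s x = false := by
      cases hcc : PySem.Set.contains s x
      · rfl
      · exact absurd ((PySem.Set.contains_iff s x).1 hcc) h
    simp [h, PySem.Set.add_of_not_mem h]

theorem pvDedupStepB_diag (s : PySem.Set Int) (e : Int × Int) :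
    pvDedupStepB (s, s) e = (PySem.Set.add (PySem.Set.add s e.1) e.2, PySem.Set.add (PySem.Set.add s e.1) e.2) := by
  show (let st1 := if PySem.Set.contains s e.1 then ((s : PySem.Set Int), (s : List Int)) else (PySem.Set.add s e.1, (s:List Int) ++ [e.1]);
    if PySem.Set.contains st1.1 e.2 then st1 else (PySem.Set.add st1.1 e.2, st1.2 ++ [e.2])) = _
  rw [pvAdd_pair]
  exact pvAdd_pair (PySem.Set.add s e.1) e.2

theorem pvDedupB_diag (g : List (Int × Int)) (s : PySem.Set Int) :
    g.foldl pvDedupStepB (s, s) = ((pvAll g).foldl PySem.Set.add s, (pvAll g).foldl PySem.Set.add s) := by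
  induction g generalizing s with
  | nil => simp [pvAll]
  | cons e g ih =>
    rw [List.foldl_cons, pvDedupStepB_diag, ih]
    simp [pvAll]

theorem pvOrderB_eq (g : List (Int × Int)) :
    (g.foldl pvDedupStepB (PySem.Set.empty, [])).2 = PySem.Set.ofList (pvAll g) := by
  rw [show ((PySem.Set.empty : PySem.Set Int), ([] : List Int)) = (([] : PySem.Set Int), ([] : List Int)) from rfl]
  rw [pvDedupB_diag g []]
  rw [PySem.Set.ofList_eq_foldl]

theorem pvGraphNodesA_eq_ofList (g : List (Int × Int)) :
    pvGraphNodesA g = PySem.Set.ofList (pvAll g) := by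
  show (g.foldl (fun acc e => [e.1, e.2].foldl pvAddNodeA acc) []) = _
  rw [← List.foldl_flatMap]
  rfl

-- ---- A-side pass lemmas ----
theorem pvPassStepA_cases (c : List Int) (e : Int × Int) :
    pvPassStepA c e = c ∨
    (pvPassStepA c e = c ++ [e.2] ∧ e.1 ∈ c ∧ e.2 ∉ c) ∨
    (pvPassStepA c e = c ++ [e.1] ∧ e.2 ∈ c ∧ e.1 ∉ c) := by
  by_cases h1 : e.1 ∈ c <;> by_cases h2 : e.2 ∈ c <;>
    simp only [pvPassStepA, List.contains_iff_mem] <;> simp [h1, h2]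

theorem pvPassStepA_prefix (c : List Int) (e : Int × Int) : c <+: pvPassStepA c e := by
  rcases pvPassStepA_cases c e with h | ⟨h, _, _⟩ | ⟨h, _, _⟩ <;> rw [h]
  all_goals exact List.prefix_append c _

theorem pvPassA_prefix (l : List (Int × Int)) (c : List Int) :
    c <+: l.foldl pvPassStepA c := by
  induction l generalizing c with
  | nil => exact List.prefix_refl c
  | cons e l ih => exact (pvPassStepA_prefix c e).trans (ih _)

theorem pvPassA_nodup (l : List (Int × Int)) (c : List Int) (h : c.Nodup) :
    (l.foldl pvPassStepA c).Nodup := by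
  induction l generalizing c with
  | nil => exact h
  | cons e l ih =>
    refine ih _ ?_
    rcases pvPassStepA_cases c e with he | ⟨he, _, hn⟩ | ⟨he, _, hn⟩
    · rwa [he]
    · rw [he]; simp [List.nodup_append, h]; exact fun a ha hax => hn (hax ▸ ha)
    · rw [he]; simp [List.nodup_append, h]; exact fun a ha hax => hn (hax ▸ ha)

theorem pvPassA_subset (l : List (Int × Int)) (c : List Int) (x : Int)
    (hx : x ∈ l.foldl pvPassStepA c) : x ∈ c ∨ x ∈ pvAll l := by
  induction l generalizing c with
  | nil => exact Or.inl hx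
  | cons e l ih =>
    rcases ih _ hx with h | h
    · rcases pvPassStepA_cases c e with he | ⟨he, _, _⟩ | ⟨he, _, _⟩ <;> rw [he] at h
      · exact Or.inl h
      · rcases List.mem_append.1 h with h | h
        · exact Or.inl h
        · right; simp at h; simp [pvAll, h]
      · rcases List.mem_append.1 h with h | h
        · exact Or.inl h
        · right; simp at h; simp [pvAll, h]
    · right
      simp [pvAll] at h ⊢
      exact Or.inr (Or.inr h)

theorem pvPassA_sound (g l : List (Int × Int)) (hl : ∀ e ∈ l, e ∈ g) (c : List Int) (s : Int)
    (hc : ∀ x ∈ c, pvReach g s x) : ∀ x ∈ l.foldl pvPassStepA c, pvReach g s x := by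
  induction l generalizing c with
  | nil => exact hc
  | cons e l ih =>
    refine ih (fun e' he' => hl e' (List.mem_cons_of_mem _ he')) _ ?_
    intro x hx
    rcases pvPassStepA_cases c e with he | ⟨he, h1, _⟩ | ⟨he, h1, _⟩ <;> rw [he] at hx
    · exact hc x hx
    · rcases List.mem_append.1 hx with hx | hx
      · exact hc x hx
      · simp at hx; subst hx
        exact Relation.ReflTransGen.tail (hc e.1 h1) (Or.inl (by simpa using hl e (by simp)))
    · rcases List.mem_append.1 hx with hx | hx
      · exact hc x hx
      · simp at hx; subst hx
        exact Relation.ReflTransGen.tail (hc e.2 h1) (Or.inr (by simpa using hl e (by simp)))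

theorem pvPassStepA_mem_edge (c : List Int) (e : Int × Int) :
    (e.1 ∈ c → e.2 ∈ pvPassStepA c e) ∧ (e.2 ∈ c → e.1 ∈ pvPassStepA c e) := by
  by_cases h1 : e.1 ∈ c <;> by_cases h2 : e.2 ∈ c <;> constructor <;> intro hm <;>
    simp [pvPassStepA, h1, h2] <;> first | exact h1 hm | exact h2 hm

theorem pvPassA_edge (l : List (Int × Int)) (c : List Int) (e : Int × Int) (he : e ∈ l) :
    (e.1 ∈ c → e.2 ∈ l.foldl pvPassStepA c) ∧ (e.2 ∈ c → e.1 ∈ l.foldl pvPassStepA c) := by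
  induction l generalizing c with
  | nil => cases he
  | cons f l ih =>
    rcases List.mem_cons.1 he with rfl | he'
    · exact ⟨fun hm => (pvPassA_prefix l _).subset ((pvPassStepA_mem_edge c e).1 hm),
             fun hm => (pvPassA_prefix l _).subset ((pvPassStepA_mem_edge c e).2 hm)⟩
    · have h1 := ih (pvPassStepA c f) he'
      refine ⟨fun hm => h1.1 ((pvPassStepA_prefix c f).subset hm),
              fun hm => h1.2 ((pvPassStepA_prefix c f).subset hm)⟩

theorem pvPassA_growth (g : List (Int × Int)) (m : Nat) (c0 : List Int) :
    pvConnPassA g ((pvConnPassA g)^[m] c0) = (pvConnPassA g)^[m] c0 ∨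
    c0.length + m ≤ ((pvConnPassA g)^[m] c0).length := by
  induction m with
  | zero => right; simp
  | succ k ih =>
    rcases ih with h | h
    · left; rw [Function.iterate_succ_apply', h, h]
    · by_cases he : pvConnPassA g ((pvConnPassA g)^[k] c0) = (pvConnPassA g)^[k] c0
      · left; rw [Function.iterate_succ_apply', he, he]
      · right
        rw [Function.iterate_succ_apply']
        have hp := pvPassA_prefix g ((pvConnPassA g)^[k] c0)
        have hlt : ((pvConnPassA g)^[k] c0).length < (pvConnPassA g ((pvConnPassA g)^[k] c0)).length := by
          rcases lt_or_eq_of_le hp.length_le with h' | h'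
          · exact h'
          · exact absurd (hp.eq_of_length h').symm he
        omega


theorem pvClosureA_spec (g : List (Int × Int)) (nodes : List Int) (start : Int)
    (hnd : nodes.Nodup) (hmem : ∀ x, x ∈ nodes ↔ x ∈ pvAll g) (hs : start ∈ nodes) :
    ((pvConnPassA g)^[nodes.length] [start]).Nodup ∧
    (∀ x, x ∈ (pvConnPassA g)^[nodes.length] [start] ↔ pvReach g start x) := by
  have hsub : ∀ m, ∀ x ∈ (pvConnPassA g)^[m] [start], x ∈ nodes := by
    intro m
    induction m with
    | zero => intro x hx; simp at hx; subst hx; exact hs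
    | succ k ih =>
      intro x hx
      rw [Function.iterate_succ_apply'] at hx
      rcases pvPassA_subset g _ x hx with h | h
      · exact ih x h
      · exact (hmem x).2 h
  have hndX : ∀ m, ((pvConnPassA g)^[m] [start]).Nodup := by
    intro m
    induction m with
    | zero => simp
    | succ k ih => rw [Function.iterate_succ_apply']; exact pvPassA_nodup g _ ih
  have hfix : pvConnPassA g ((pvConnPassA g)^[nodes.length] [start]) = (pvConnPassA g)^[nodes.length] [start] := by
    rcases pvPassA_growth g nodes.length [start] with h | h
    · exact h
    · have := pvLength_le_of_nodup_subset _ nodes (hndX nodes.length) (hsub nodes.length)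
      simp at h
      omega
  have hsound : ∀ m, ∀ x ∈ (pvConnPassA g)^[m] [start], pvReach g start x := by
    intro m
    induction m with
    | zero => intro x hx; simp at hx; subst hx; exact Relation.ReflTransGen.refl
    | succ k ih =>
      rw [Function.iterate_succ_apply']
      exact pvPassA_sound g g (fun e he => he) _ start ih
  have hstart : ∀ m, start ∈ (pvConnPassA g)^[m] [start] := by
    intro m
    induction m with
    | zero => simp
    | succ k ih =>
      rw [Function.iterate_succ_apply']
      exact (pvPassA_prefix g _).subset ih
  refine ⟨hndX _, fun x => ⟨fun hx => hsound _ x hx, fun hx => ?_⟩⟩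
  induction hx with
  | refl => exact hstart _
  | tail hr hadj ih3 =>
    rename_i b c
    rcases hadj with h | h
    · have h2 : c ∈ pvConnPassA g ((pvConnPassA g)^[nodes.length] [start]) :=
        (pvPassA_edge g _ (b, c) h).1 ih3
      rwa [hfix] at h2
    · have h2 : c ∈ pvConnPassA g ((pvConnPassA g)^[nodes.length] [start]) :=
        (pvPassA_edge g _ (c, b) h).2 ih3
      rwa [hfix] at h2

-- ---- B-side BFS lemmas ----
theorem pvBfsEdgeB_cases (u : Int) (st : PySem.Set Int × List Int) (e : Int × Int) :
    pvBfsEdgeB u st e = st ∨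
    ∃ x, ((e.1 = u ∧ x = e.2) ∨ (e.2 = u ∧ x = e.1)) ∧ x ∉ st.1 ∧
      pvBfsEdgeB u st e = (st.1 ++ [x], st.2 ++ [x]) := by
  unfold pvBfsEdgeB
  split_ifs with h1 h2
  · simp at h1
    exact Or.inr ⟨e.2, Or.inl ⟨h1.1, rfl⟩, h1.2, by rw [PySem.Set.add_of_not_mem h1.2]⟩
  · simp at h2
    exact Or.inr ⟨e.1, Or.inr ⟨h2.1, rfl⟩, h2.2, by rw [PySem.Set.add_of_not_mem h2.2]⟩
  · exact Or.inl rfl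

theorem pvBfsEdgeB_mem_edge (u : Int) (st : PySem.Set Int × List Int) (e : Int × Int)
    (hu : u ∈ st.1) :
    (e.1 = u → e.2 ∈ (pvBfsEdgeB u st e).1) ∧ (e.2 = u → e.1 ∈ (pvBfsEdgeB u st e).1) := by
  by_cases h1 : e.1 = u <;> by_cases h2 : e.2 = u <;>
    by_cases m1 : e.1 ∈ st.1 <;> by_cases m2 : e.2 ∈ st.1 <;>
    simp [pvBfsEdgeB, h1, h2, m1, m2, hu, PySem.Set.mem_add, PySem.Set.add_of_not_mem]

theorem pvVisitB_pair (l : List (Int × Int)) (u : Int) (st : PySem.Set Int × List Int) :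
    ∃ t, l.foldl (pvBfsEdgeB u) st = (st.1 ++ t, st.2 ++ t) ∧
      (∀ x ∈ t, x ∉ st.1 ∧ ((u, x) ∈ l ∨ (x, u) ∈ l)) := by
  induction l generalizing st with
  | nil => exact ⟨[], by simp⟩
  | cons e l ih =>
    rcases pvBfsEdgeB_cases u st e with hc | ⟨x0, hor, hx0, hc⟩
    · obtain ⟨t, h, hp⟩ := ih st
      refine ⟨t, by rw [List.foldl_cons, hc]; exact h, fun x hx => ⟨(hp x hx).1, ?_⟩⟩
      rcases (hp x hx).2 with h' | h' <;> simp [h']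
    · obtain ⟨t, h, hp⟩ := ih (st.1 ++ [x0], st.2 ++ [x0])
      refine ⟨x0 :: t, ?_, ?_⟩
      · rw [List.foldl_cons, hc, h]
        simp
      · intro x hx
        rcases List.mem_cons.1 hx with rfl | hx'
        · refine ⟨hx0, ?_⟩
          rcases hor with ⟨h1, h2⟩ | ⟨h1, h2⟩
          · subst h1; subst h2; left; simp
          · subst h1; subst h2; right; simp
        · have := hp x hx'
          refine ⟨fun hm => this.1 (by simp [hm]), ?_⟩
          rcases this.2 with h' | h' <;> simp [h']

theorem pvVisitB_nodup (l : List (Int × Int)) (u : Int) (st : PySem.Set Int × List Int)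
    (h : st.1.Nodup) : (l.foldl (pvBfsEdgeB u) st).1.Nodup := by
  induction l generalizing st with
  | nil => exact h
  | cons e l ih =>
    rw [List.foldl_cons]
    rcases pvBfsEdgeB_cases u st e with hc | ⟨x0, _, hx0, hc⟩ <;> rw [hc]
    · exact ih _ h
    · refine ih _ ?_
      simp [List.nodup_append, h]
      exact fun a ha hax => hx0 (hax ▸ ha)

theorem pvVisitB_edge (l : List (Int × Int)) (u : Int) (st : PySem.Set Int × List Int)
    (hu : u ∈ st.1) (e : Int × Int) (he : e ∈ l) :
    (e.1 = u → e.2 ∈ (l.foldl (pvBfsEdgeB u) st).1) ∧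
    (e.2 = u → e.1 ∈ (l.foldl (pvBfsEdgeB u) st).1) := by
  induction l generalizing st with
  | nil => cases he
  | cons f l ih =>
    have hpre : ∀ y, y ∈ (pvBfsEdgeB u st f).1 → y ∈ (l.foldl (pvBfsEdgeB u) (pvBfsEdgeB u st f)).1 := by
      intro y hy
      obtain ⟨t, hp, _⟩ := pvVisitB_pair l u (pvBfsEdgeB u st f)
      rw [hp]
      simp
      exact Or.inl hy
    have hu' : u ∈ (pvBfsEdgeB u st f).1 := by
      rcases pvBfsEdgeB_cases u st f with hc | ⟨x0, _, _, hc⟩ <;> rw [hc] <;> simp [hu]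
    rcases List.mem_cons.1 he with rfl | he'
    · rw [List.foldl_cons]
      exact ⟨fun h1 => hpre _ ((pvBfsEdgeB_mem_edge u st e hu).1 h1),
             fun h2 => hpre _ ((pvBfsEdgeB_mem_edge u st e hu).2 h2)⟩
    · rw [List.foldl_cons]
      exact ih _ hu' he'

theorem pvClosedAt_mono (g : List (Int × Int)) (v v' : List Int)
    (hsub : ∀ x ∈ v, x ∈ v') (u : Int) (h : pvClosedAt g v u) : pvClosedAt g v' u :=
  fun e he => ⟨fun h1 => hsub _ ((h e he).1 h1), fun h2 => hsub _ ((h e he).2 h2)⟩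

theorem pvRoundB_pair (g : List (Int × Int)) (fr : List Int) (v : PySem.Set Int) (c : List Int) :
    ∃ t, fr.foldl (pvVisitB g) (v, c) = (v ++ t, c ++ t) ∧
      (∀ x ∈ t, x ∉ v ∧ ∃ u ∈ fr, (u, x) ∈ g ∨ (x, u) ∈ g) := by
  induction fr generalizing v c with
  | nil => exact ⟨[], by simp⟩
  | cons a fr ih =>
    obtain ⟨t1, hp1, hq1⟩ := pvVisitB_pair g a (v, c)
    obtain ⟨t2, hp2, hq2⟩ := ih (v ++ t1) (c ++ t1)
    refine ⟨t1 ++ t2, ?_, ?_⟩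
    · rw [List.foldl_cons]
      show (g.foldl (pvBfsEdgeB a) (v, c) |> fr.foldl (pvVisitB g)) = _
      rw [hp1]
      rw [hp2]
      simp
    · intro x hx
      rcases List.mem_append.1 hx with hx | hx
      · exact ⟨(hq1 x hx).1, a, by simp, (hq1 x hx).2⟩
      · obtain ⟨hnm, u, hu, hadj⟩ := hq2 x hx
        exact ⟨fun hm => hnm (by simp [hm]), u, by simp [hu], hadj⟩

theorem pvRoundB_nodup (g : List (Int × Int)) (fr : List Int) (v : PySem.Set Int) (c : List Int)
    (h : v.Nodup) : (fr.foldl (pvVisitB g) (v, c)).1.Nodup := by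
  induction fr generalizing v c with
  | nil => exact h
  | cons a fr ih =>
    rw [List.foldl_cons]
    obtain ⟨t1, hp1, _⟩ := pvVisitB_pair g a (v, c)
    have hnd : (pvVisitB g (v, c) a).1.Nodup := pvVisitB_nodup g a (v, c) h
    have : pvVisitB g (v, c) a = (v ++ t1, c ++ t1) := hp1
    rw [this] at hnd ⊢
    exact ih _ _ hnd

theorem pvRoundB_closure (g : List (Int × Int)) (rest : List Int) :
    ∀ (w : PySem.Set Int) (nf : List Int),
    (∀ u ∈ rest, u ∈ w) →
    (∀ u ∈ w, u ∈ rest ∨ u ∈ nf ∨ pvClosedAt g w u) →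
    ∀ u ∈ (rest.foldl (pvVisitB g) (w, nf)).1,
      u ∈ (rest.foldl (pvVisitB g) (w, nf)).2 ∨ pvClosedAt g (rest.foldl (pvVisitB g) (w, nf)).1 u := by
  induction rest with
  | nil =>
    intro w nf _ hinv u hu
    rcases hinv u hu with h | h | h
    · cases h
    · exact Or.inl h
    · exact Or.inr h
  | cons a rest ih =>
    intro w nf hrest hinv
    obtain ⟨t1, hp1, hq1⟩ := pvVisitB_pair g a (w, nf)
    have hstep : pvVisitB g (w, nf) a = (w ++ t1, nf ++ t1) := hp1
    have ha : a ∈ w := hrest a (by simp)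
    have hclosed_a : pvClosedAt g (pvVisitB g (w, nf) a).1 a := by
      intro e he
      exact pvVisitB_edge g a (w, nf) ha e he
    rw [List.foldl_cons]
    rw [hstep] at hclosed_a ⊢
    refine ih (w ++ t1) (nf ++ t1) ?_ ?_
    · exact fun u hu => by simp [hrest u (by simp [hu])]
    · intro u hu
      rcases List.mem_append.1 hu with hu | hu
      · rcases hinv u hu with h | h | h
        · rcases List.mem_cons.1 h with rfl | h'
          · right; right; exact hclosed_a
          · exact Or.inl h'
        · right; left; simp [h]
        · right; right; exact pvClosedAt_mono g w _ (fun x hx => by simp [hx]) u h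
      · right; left; simp [hu]

theorem pvInvB_step (g : List (Int × Int)) (nodes : List Int) (start : Int)
    (hmem : ∀ x, x ∈ nodes ↔ x ∈ pvAll g)
    (st : PySem.Set Int × List Int) (h : pvInvB g nodes start st) :
    pvInvB g nodes start (pvRoundB g st) := by
  obtain ⟨h1, h2, h3, h4, h5, h6⟩ := h
  obtain ⟨t, hp, hq⟩ := pvRoundB_pair g st.2 st.1 []
  have hr : pvRoundB g st = (st.1 ++ t, t) := by simpa using hp
  have hclo := pvRoundB_closure g st.2 st.1 [] h2
    (fun u hu => by rcases h6 u hu with h | h; exacts [Or.inl h, Or.inr (Or.inr h)])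
  rw [hr]
  refine ⟨?_, ?_, ?_, ?_, ?_, ?_⟩
  · have := pvRoundB_nodup g st.2 st.1 [] h1
    rwa [hp] at this
  · intro x hx; simp [hx]
  · intro x hx
    rcases List.mem_append.1 hx with hx | hx
    · exact h3 x hx
    · obtain ⟨_, u, hu, hadj⟩ := hq x hx
      exact Relation.ReflTransGen.tail (h3 u (h2 u hu)) hadj
  · intro x hx
    rcases List.mem_append.1 hx with hx | hx
    · exact h4 x hx
    · obtain ⟨_, u, hu, hadj⟩ := hq x hx
      refine (hmem x).2 ((pvMem_pvAll g x).2 ?_)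
      rcases hadj with h | h
      · exact ⟨(u, x), h, Or.inr rfl⟩
      · exact ⟨(x, u), h, Or.inl rfl⟩
  · simp [h5]
  · intro u hu
    have := hclo u (by rwa [hp])
    rwa [hp] at this


theorem pvInvB_iterate (g : List (Int × Int)) (nodes : List Int) (start : Int)
    (hmem : ∀ x, x ∈ nodes ↔ x ∈ pvAll g) (hs : start ∈ nodes) (m : Nat) :
    pvInvB g nodes start ((pvRoundB g)^[m] ([start], [start])) := by
  induction m with
  | zero =>
    refine ⟨by simp, by simp, ?_, ?_, by simp, by simp⟩
    · intro x hx; simp at hx; subst hx; exact Relation.ReflTransGen.refl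
    · intro x hx; simp at hx; subst hx; exact hs
  | succ k ih =>
    rw [Function.iterate_succ_apply']
    exact pvInvB_step g nodes start hmem _ ih

theorem pvBfsB_growth (g : List (Int × Int)) (start : Int) (m : Nat) :
    ((pvRoundB g)^[m] ([start], [start])).2 = [] ∨
    m + 1 ≤ ((pvRoundB g)^[m] ([start], [start])).1.length := by
  induction m with
  | zero => right; simp
  | succ k ih =>
    rw [Function.iterate_succ_apply']
    set st := (pvRoundB g)^[k] ([start], [start]) with hst
    obtain ⟨t, hp, _⟩ := pvRoundB_pair g st.2 st.1 []
    have hr : pvRoundB g st = (st.1 ++ t, t) := by simpa using hp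
    rcases ih with h | h
    · left
      have ht : t = [] := by
        rw [h] at hp
        simpa using (congrArg Prod.snd hp).symm
      rw [hr, ht]
    · rcases List.eq_nil_or_concat t with rfl | _
      · left; rw [hr]
      · right
        rw [hr]
        simp
        have : t ≠ [] := by rename_i ht; rcases ht with ⟨a, b, rfl⟩; simp
        have : 1 ≤ t.length := by
          cases t with
          | nil => simp at this
          | cons a t => simp
        omega

theorem pvBfsB_spec (g : List (Int × Int)) (nodes : List Int) (start : Int)
    (hnd : nodes.Nodup) (hmem : ∀ x, x ∈ nodes ↔ x ∈ pvAll g) (hs : start ∈ nodes) :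
    ((pvRoundB g)^[nodes.length] ([start], [start])).1.Nodup ∧
    (∀ x, x ∈ ((pvRoundB g)^[nodes.length] ([start], [start])).1 ↔ pvReach g start x) := by
  obtain ⟨h1, h2, h3, h4, h5, h6⟩ := pvInvB_iterate g nodes start hmem hs nodes.length
  have hempty : ((pvRoundB g)^[nodes.length] ([start], [start])).2 = [] := by
    rcases pvBfsB_growth g start nodes.length with h | h
    · exact h
    · have := pvLength_le_of_nodup_subset _ nodes h1 h4
      omega
  refine ⟨h1, fun x => ⟨fun hx => h3 x hx, fun hx => ?_⟩⟩
  induction hx with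
  | refl => exact h5
  | tail hr hadj ih3 =>
    rename_i b c
    have hb := h6 b ih3
    rw [hempty] at hb
    rcases hb with hb | hb
    · cases hb
    · rcases hadj with h | h
      · exact (hb (b, c) h).1 rfl
      · exact (hb (c, b) h).2 rfl


-- ===== VERDICT (by name: the statement is the Claim_ definition above) =====
theorem is_graph_valid_spec : Claim_equal_is_graph_valid := by
  intro g n _ hpre
  unfold Spec_is_graph_valid
  have horder : (g.foldl pvDedupStepB (PySem.Set.empty, [])).2 = pvGraphNodesA g := by
    rw [pvOrderB_eq, pvGraphNodesA_eq_ofList]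
  by_cases h : n = pvGraphNodesA g
  · have hofl : pvGraphNodesA g = PySem.Set.ofList (pvAll g) := pvGraphNodesA_eq_ofList g
    have hnd : n.Nodup := by rw [h, hofl]; exact PySem.Set.nodup_ofList (pvAll g)
    have hmem : ∀ x, x ∈ n ↔ x ∈ pvAll g := by
      intro x; rw [h, hofl]; exact PySem.Set.mem_ofList (pvAll g) x
    have hn : n ≠ [] := by
      intro hnil
      cases hg : g with
      | nil => exact hpre ⟨hg, hnil⟩
      | cons e gs =>
        have : e.1 ∈ n := (hmem e.1).2 (by rw [hg]; simp [pvAll])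
        rw [hnil] at this
        cases this
    have hs : n.headI ∈ n := by
      cases n with
      | nil => exact absurd rfl hn
      | cons a t => simp [List.headI]
    obtain ⟨hAnd, hAmem⟩ := pvClosureA_spec g n n.headI hnd hmem hs
    obtain ⟨hBnd, hBmem⟩ := pvBfsB_spec g n n.headI hnd hmem hs
    have hperm : ((pvConnPassA g)^[n.length] [n.headI]).Perm
        (((pvRoundB g)^[n.length] ([n.headI], [n.headI])).1) := by
      rw [List.perm_ext_iff_of_nodup hAnd hBnd]
      intro a
      rw [hAmem a, hBmem a]
    have hlen := hperm.length_eq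
    have hA : is_graph_valid g n = pvIsConnectedA g n := by
      simp only [is_graph_valid]
      rw [if_pos h]
      cases pvIsConnectedA g n <;> simp
    have hAc : pvIsConnectedA g n =
        decide (((pvConnPassA g)^[n.length] [n.headI]).length = n.length) := by
      simp only [pvIsConnectedA]
      rw [pvFoldl_range_iterate (pvConnPassA g) n.length [n.headI]]
    have hB : is_graph_valid_alt g n =
        decide ((((pvRoundB g)^[n.length] ([n.headI], [n.headI])).1).length = n.length) := by
      simp only [is_graph_valid_alt, horder]
      rw [if_neg (by simpa using h)]
      rw [if_neg (by simpa [List.isEmpty_iff] using hn)]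
      have hinit : ((PySem.Set.add PySem.Set.empty n.headI : PySem.Set Int), [n.headI]) =
          (([n.headI] : PySem.Set Int), [n.headI]) := rfl
      rw [hinit, pvFoldl_range_iterate (pvRoundB g) n.length ([n.headI], [n.headI])]
    rw [hA, hAc, hB, hlen]
  · have hA : is_graph_valid g n = false := by
      simp only [is_graph_valid]
      rw [if_neg h]
    have hB : is_graph_valid_alt g n = false := by
      simp only [is_graph_valid_alt, horder]
      rw [if_pos h]
    rw [hA, hB]
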